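-- pv_equiv track=rewrite | github.com/aalex03/LicensePlateRecognition | src/validator.py | _strcspn
-- ===== SOURCE A (Python) =====
-- def _strcspn(string : str, charSet : str) -> int:
--     count=0
--     for i in string:
--         if i not in charSet:
--             count+=1
--         else:
--             break
--     return count
-- ===== SOURCE B (Python) =====
-- def _strcspn(string : str, charSet : str) -> int:
--     best = len(string)
--     for c in charSet:
--         p = string.find(c)
--         if p != -1 and p < best:
--             best = p
--     return best
-- ===== Notes on version B (the rewrite author's own statement) =====
-- stated objective: alternative
-- what changed: B inverts the traversal: instead of A's single left-to-right scan of `string` with a per-character membership test against `charSet`, B loops over `charSet`, takes `string.find(c)` for each character (ignoring -1) and keeps the minimum position, starting from len(string).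
import Mathlib
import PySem

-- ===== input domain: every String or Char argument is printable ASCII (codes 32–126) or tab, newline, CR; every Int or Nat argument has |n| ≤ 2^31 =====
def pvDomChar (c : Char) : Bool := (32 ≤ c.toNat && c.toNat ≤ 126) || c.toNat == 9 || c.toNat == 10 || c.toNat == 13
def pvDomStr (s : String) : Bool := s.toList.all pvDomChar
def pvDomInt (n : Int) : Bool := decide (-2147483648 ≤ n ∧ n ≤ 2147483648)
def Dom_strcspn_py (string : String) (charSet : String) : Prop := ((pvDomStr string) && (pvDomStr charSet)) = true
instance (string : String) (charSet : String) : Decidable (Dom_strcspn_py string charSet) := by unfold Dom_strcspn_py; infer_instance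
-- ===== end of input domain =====

-- B scans `charSet` with str.find instead of A's left-to-right scan of `string`; alternative decomposition, no speed claim.

-- ===== PORT A =====
-- the for-loop of A: accumulator `count`, break on the first char that is in charSet
def pvLoopA (cs : List Char) (count : Int) : List Char → Int
  | [] => count
  | i :: rest =>
      if PySem.Chars.isIn [i] cs = false then pvLoopA cs (count + 1) rest
      else count

def strcspn_py (string : String) (charSet : String) : Int :=
  pvLoopA charSet.toList 0 string.toList

-- ===== PORT B =====
-- the for-loop of B: best position so far, updated from string.find(c)
def strcspn_py_alt (string : String) (charSet : String) : Int :=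
  charSet.toList.foldl
    (fun best c =>
      let p := PySem.Chars.find string.toList [c]
      if p ≠ -1 ∧ p < best then p else best)
    (PySem.Str.len string)

-- ===== PRECONDITION & SPEC =====
def Spec_strcspn_py (string : String) (charSet : String) (out : Int) : Prop := out = strcspn_py_alt string charSet
instance (string : String) (charSet : String) (out : Int) : Decidable (Spec_strcspn_py string charSet out) := by unfold Spec_strcspn_py; infer_instance

-- ===== CLAIM (what is proved, stated in full; the proofs are below) =====
def Claim_equal_strcspn_py : Prop := ∀ (string : String) (charSet : String), Dom_strcspn_py string charSet → Spec_strcspn_py string charSet (strcspn_py string charSet)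

-- ===== LEMMAS AND PROOFS =====

-- position of the first occurrence of c in l, or l.length if absent
def pvPos (c : Char) : List Char → Int
  | [] => 0
  | x :: xs => if x = c then 0 else 1 + pvPos c xs

theorem pvPos_nonneg (c : Char) (l : List Char) : 0 ≤ pvPos c l := by
  induction l with
  | nil => simp [pvPos]
  | cons x xs ih => simp only [pvPos]; split <;> omega

theorem pvPos_of_not_mem (c : Char) (l : List Char) (hc : c ∉ l) : pvPos c l = (l.length : Int) := by
  induction l with
  | nil => simp [pvPos]
  | cons x xs ih =>
    have hx : x ≠ c := fun h => hc (h ▸ List.mem_cons_self)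
    have : c ∉ xs := fun h => hc (List.mem_cons_of_mem _ h)
    simp [pvPos, hx, ih this]
    ring

theorem pvPos_of_prefix_min (c : Char) (l : List Char) (j : Nat)
    (hj : [c] <+: l.drop j) (hmin : ∀ i, i < j → ¬ [c] <+: l.drop i) :
    pvPos c l = (j : Int) := by
  induction l generalizing j with
  | nil => simp at hj
  | cons x xs ih =>
    cases j with
    | zero =>
      rcases hj with ⟨t, ht⟩
      simp at ht
      simp [pvPos, ht.1]
    | succ j' =>
      have hx : x ≠ c := by
        intro h
        exact hmin 0 (Nat.succ_pos _) ⟨xs, by simp [h]⟩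
      have : pvPos c xs = (j' : Int) := by
        apply ih j' (by simpa using hj)
        intro i hi
        simpa using hmin (i + 1) (by omega)
      simp [pvPos, hx, this]
      ring

theorem pvFind_singleton (c : Char) (l : List Char) :
    PySem.Chars.find l [c] = if c ∈ l then pvPos c l else -1 := by
  by_cases hc : c ∈ l
  · have hne : PySem.Chars.find l [c] ≠ -1 := by
      rw [PySem.Chars.find_ne_neg_one_iff]
      exact (List.singleton_infix_iff c l).mpr hc
    have hspec := PySem.Chars.findFrom_natCast_spec l [c] 0 (Nat.zero_le _)
    rw [Nat.cast_zero, PySem.Chars.findFrom_zero] at hspec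
    obtain ⟨hge, hpre, hmin⟩ := hspec hne
    have := pvPos_of_prefix_min c l (PySem.Chars.find l [c]).toNat (by simpa using hpre)
      (fun i hi => hmin i (Nat.zero_le _) hi)
    rw [if_pos hc, this]
    omega
  · rw [if_neg hc]
    rw [PySem.Chars.find_eq_neg_one_iff]
    intro h
    exact hc ((List.singleton_infix_iff c l).mp h)

theorem pvIsIn_singleton (c : Char) (l : List Char) :
    PySem.Chars.isIn [c] l = true ↔ c ∈ l := by
  rw [PySem.Chars.isIn_iff_infix, List.singleton_infix_iff]

-- B's fold is the min-fold of pvPos, as long as the accumulator stays in [0, length]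
theorem pvFold_eq_minFold (l : List Char) (cs : List Char) :
    ∀ best : Int, 0 ≤ best → best ≤ (l.length : Int) →
    cs.foldl (fun best c =>
        let p := PySem.Chars.find l [c]
        if p ≠ -1 ∧ p < best then p else best) best
      = cs.foldl (fun b c => min b (pvPos c l)) best := by
  induction cs with
  | nil => intro best _ _; rfl
  | cons c cs ih =>
    intro best hb0 hbl
    simp only [List.foldl_cons]
    have hstep : (let p := PySem.Chars.find l [c]
        if p ≠ -1 ∧ p < best then p else best) = min best (pvPos c l) := by
      simp only [pvFind_singleton]
      by_cases hc : c ∈ l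
      · have h0 := pvPos_nonneg c l
        simp only [if_pos hc]
        split_ifs with h
        · omega
        · omega
      · have := pvPos_of_not_mem c l hc
        simp only [if_neg hc]
        split_ifs with h
        · omega
        · omega
    rw [hstep]
    apply ih
    · exact le_min hb0 (pvPos_nonneg c l)
    · exact le_trans (min_le_left _ _) hbl

theorem pvMinFold_le_init (f : Char → Int) (cs : List Char) :
    ∀ init : Int, cs.foldl (fun b c => min b (f c)) init ≤ init := by
  induction cs with
  | nil => intro init; simp
  | cons c cs ih =>
    intro init
    exact le_trans (ih _) (min_le_left _ _)

theorem pvMinFold_le_of_mem (f : Char → Int) (cs : List Char) (c : Char) (hc : c ∈ cs) :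
    ∀ init : Int, cs.foldl (fun b c => min b (f c)) init ≤ f c := by
  induction cs with
  | nil => simp at hc
  | cons d cs ih =>
    intro init
    rcases List.mem_cons.mp hc with h | h
    · subst h
      exact le_trans (pvMinFold_le_init f cs _) (min_le_right _ _)
    · exact ih h _
  
theorem pvMinFold_nonneg (f : Char → Int) (cs : List Char) (hf : ∀ c ∈ cs, 0 ≤ f c) :
    ∀ init : Int, 0 ≤ init → 0 ≤ cs.foldl (fun b c => min b (f c)) init := by
  induction cs with
  | nil => intro init h; simpa
  | cons c cs ih =>
    intro init h
    exact ih (fun d hd => hf d (List.mem_cons_of_mem _ hd)) _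
      (le_min h (hf c (List.mem_cons_self)))

theorem pvMinFold_shift (f g : Char → Int) (cs : List Char) (hfg : ∀ c ∈ cs, f c = 1 + g c) :
    ∀ init : Int, cs.foldl (fun b c => min b (f c)) (1 + init)
      = 1 + cs.foldl (fun b c => min b (g c)) init := by
  induction cs with
  | nil => intro init; simp
  | cons c cs ih =>
    intro init
    simp only [List.foldl_cons]
    rw [hfg c List.mem_cons_self,
      show min (1 + init) (1 + g c) = 1 + min init (g c) by omega]
    exact ih (fun d hd => hfg d (List.mem_cons_of_mem _ hd)) _

-- the pure value of A's loop
def pvCnt (cs : List Char) : List Char → Int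
  | [] => 0
  | x :: xs => if x ∈ cs then 0 else 1 + pvCnt cs xs

theorem pvLoopA_eq_cnt (cs : List Char) (l : List Char) :
    ∀ count : Int, pvLoopA cs count l = count + pvCnt cs l := by
  induction l with
  | nil => intro count; simp [pvLoopA, pvCnt]
  | cons x xs ih =>
    intro count
    simp only [pvLoopA, pvCnt]
    by_cases hx : x ∈ cs
    · simp [(pvIsIn_singleton x cs).mpr hx, hx]
    · have : PySem.Chars.isIn [x] cs = false := by
        rw [Bool.eq_false_iff, Ne, pvIsIn_singleton]; exact hx
      simp [this, hx, ih]
      ring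

theorem pvMinFold_eq_cnt (cs : List Char) (l : List Char) :
    cs.foldl (fun b c => min b (pvPos c l)) (l.length : Int) = pvCnt cs l := by
  induction l with
  | nil =>
    simp only [pvCnt, List.length_nil, Nat.cast_zero]
    induction cs with
    | nil => rfl
    | cons c cs ih => simpa [pvPos] using ih
  | cons x xs ih =>
    by_cases hx : x ∈ cs
    · have h1 : cs.foldl (fun b c => min b (pvPos c (x :: xs))) ((x :: xs).length : Int)
          ≤ pvPos x (x :: xs) := pvMinFold_le_of_mem _ cs x hx _
      have h2 : 0 ≤ cs.foldl (fun b c => min b (pvPos c (x :: xs))) ((x :: xs).length : Int) :=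
        pvMinFold_nonneg _ cs (fun c _ => pvPos_nonneg c _) _ (by positivity)
      have hp : pvPos x (x :: xs) = 0 := by simp [pvPos]
      rw [hp] at h1
      simp only [pvCnt, if_pos hx]
      omega
    · have hshift : ∀ c ∈ cs, pvPos c (x :: xs) = 1 + pvPos c xs := by
        intro c hc
        have : x ≠ c := fun h => hx (h ▸ hc)
        simp [pvPos, this]
      have hlen : ((x :: xs).length : Int) = 1 + (xs.length : Int) := by
        simp; ring
      rw [hlen, pvMinFold_shift _ _ cs hshift, ih]
      simp [pvCnt, hx]

-- ===== VERDICT (by name: the statement is the Claim_ definition above) =====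
theorem strcspn_py_spec : Claim_equal_strcspn_py := by
  intro string charSet _
  show strcspn_py string charSet = strcspn_py_alt string charSet
  unfold strcspn_py strcspn_py_alt
  rw [pvLoopA_eq_cnt, pvFold_eq_minFold string.toList charSet.toList (PySem.Str.len string)
    (by simp [PySem.Str.len_eq]) (by simp [PySem.Str.len_eq]),
    show PySem.Str.len string = (string.toList.length : Int) by simp [PySem.Str.len_eq],
    pvMinFold_eq_cnt]
  simp
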